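-- pv_equiv track=rewrite | github.com/10639780/proti | testing/bab.py | score_func
-- ===== SOURCE A (Python) =====
-- protein = ['H', 'H', 'H', 'H', 'H', 'H', 'H', 'H', 'H', 'H', 'H', 'H', 'P', 'H', 'P', 'H', 'P', 'P',
--      'H', 'H', 'P', 'P', 'H', 'H', 'P', 'P', 'H', 'P', 'P', 'H', 'H', 'P', 'P', 'H', 'H', 'P', 'P',
--         'H', 'P', 'P', 'H', 'H', 'P', 'P', 'H', 'H', 'P', 'P', 'H', 'P', 'H', 'P', 'H', 'H', 'H', 'H',
--             'H', 'H', 'H', 'H', 'H', 'H', 'H', 'H'] # 64, opti -42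
--
-- def score_func(string):
--     """Given the coordinates of a protein string, calculate the score of the shape."""
--
--     # list to place the 'already scored' atoms into
--     coordinates = []
--     directions = [[-1,0],[0,1],[1,0],[0,-1]]
--     score = 0
--     list_x, list_y = direction_to_xy(string)
--     length = len(list_x)
--
--
--     for i in range(length):
--
--         # P's dont interact so can skip those cases
--         if not protein[i] == 'P':
--
--             # for every atom look around in all 4 directions
--             for d in directions:
--
--                 # check whether one of the previously placed atoms is in the vicinity and determine the score of the interaction with it and the current atom
--                 for j in range(len(coordinates)):
--
--                     if [list_x[i] + d[0], list_y[i] + d[1]] == coordinates[j] and not(list_x[i] + d[0] == list_x[i-1] and list_y[i] + d[1] == list_y[i-1]):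
--
--                         if protein[i] == 'H':
--                             if protein[j] == 'H' or protein[j] == 'C':
--                                 score += -1
--
--                         if protein[i] == 'C':
--                             if protein[j] == 'C':
--                                 score += -5
--                             if protein[j] == 'H':
--                                 score += -1
--
--         # place in the list with coordinates
--         coordinates.append([list_x[i], list_y[i]])
--
--     return score
--
-- def direction_to_xy(string):
--     """Converts a series of string with directions like ['L', 'R'] to lists with xy positions."""
--
--     pos_x = [0,1]
--     pos_y = [0,0]
--
--     # go over every node
--     for s in string:
--
--         # previous direction is determined
--         delta_x = pos_x[-1] - pos_x[-2]
--         delta_y = pos_y[-1] - pos_y[-2]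
--
--         # rotation matrices used to turn into the desired direction
--         if s == 'S':
--             pos_x.append(pos_x[-1] + delta_x)
--             pos_y.append(pos_y[-1] + delta_y)
--
--         elif s == 'L':
--             pos_x.append(pos_x[-1] - delta_y)
--             pos_y.append(pos_y[-1] + delta_x)
--
--         elif s == 'R':
--             pos_x.append(pos_x[-1] + delta_y )
--             pos_y.append(pos_y[-1] - delta_x)
--
--
--
--     return pos_x, pos_y
-- ===== SOURCE B (Python) =====
-- protein = ['H', 'H', 'H', 'H', 'H', 'H', 'H', 'H', 'H', 'H', 'H', 'H', 'P', 'H', 'P', 'H', 'P', 'P',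
--      'H', 'H', 'P', 'P', 'H', 'H', 'P', 'P', 'H', 'P', 'P', 'H', 'H', 'P', 'P', 'H', 'H', 'P', 'P',
--         'H', 'P', 'P', 'H', 'H', 'P', 'P', 'H', 'H', 'P', 'P', 'H', 'P', 'H', 'P', 'H', 'H', 'H', 'H',
--             'H', 'H', 'H', 'H', 'H', 'H', 'H', 'H'] # 64, opti -42
--
-- def direction_to_xy(string):
--     """Converts a series of string with directions like ['L', 'R'] to lists with xy positions."""
--     pos_x = [0,1]
--     pos_y = [0,0]
--     for s in string:
--         delta_x = pos_x[-1] - pos_x[-2]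
--         delta_y = pos_y[-1] - pos_y[-2]
--         if s == 'S':
--             pos_x.append(pos_x[-1] + delta_x)
--             pos_y.append(pos_y[-1] + delta_y)
--         elif s == 'L':
--             pos_x.append(pos_x[-1] - delta_y)
--             pos_y.append(pos_y[-1] + delta_x)
--         elif s == 'R':
--             pos_x.append(pos_x[-1] + delta_y)
--             pos_y.append(pos_y[-1] - delta_x)
--     return pos_x, pos_y
--
-- def score_func(string):
--     """Given the coordinates of a protein string, calculate the score of the shape."""
--     list_x, list_y = direction_to_xy(string)
--     hcnt = {}   # coordinate -> number of already-placed H atoms there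
--     ccnt = {}   # coordinate -> number of already-placed C atoms there
--     score = 0
--     prev = None
--     for i in range(len(list_x)):
--         p = (list_x[i], list_y[i])
--         kind = protein[i]
--         if kind == 'H' or kind == 'C':
--             for nb in ((p[0]-1, p[1]), (p[0], p[1]+1), (p[0]+1, p[1]), (p[0], p[1]-1)):
--                 if nb == prev:
--                     continue
--                 h = hcnt.get(nb, 0)
--                 c = ccnt.get(nb, 0)
--                 if kind == 'H':
--                     score -= h + c
--                 else:
--                     score -= h + 5 * c
--             if kind == 'H':
--                 hcnt[p] = hcnt.get(p, 0) + 1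
--             else:
--                 ccnt[p] = ccnt.get(p, 0) + 1
--         prev = p
--     return score
-- ===== Notes on version B (the rewrite author's own statement) =====
-- stated objective: alternative
-- what changed: Replaces A's scan over all previously placed atoms for each of the 4 neighbours of each atom by two dictionaries counting the already-placed H and C atoms per coordinate, so each neighbour becomes a single lookup (quadratic-in-moves scoring becomes linear; under Pre_ the move count is capped at 62, so overall runtime is dominated by the shared coordinate walk and no measurable speed-up is claimed).
import Mathlib
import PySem

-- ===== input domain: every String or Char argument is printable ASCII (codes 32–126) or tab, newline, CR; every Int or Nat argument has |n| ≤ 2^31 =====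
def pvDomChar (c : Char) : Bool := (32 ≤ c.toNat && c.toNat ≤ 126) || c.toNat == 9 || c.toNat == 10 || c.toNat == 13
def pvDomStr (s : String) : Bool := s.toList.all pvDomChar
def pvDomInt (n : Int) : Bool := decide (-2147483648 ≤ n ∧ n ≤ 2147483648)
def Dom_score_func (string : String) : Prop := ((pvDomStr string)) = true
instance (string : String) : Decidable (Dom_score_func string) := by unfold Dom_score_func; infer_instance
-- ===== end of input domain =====

-- B replaces A's scan over all previously placed atoms (per neighbour of each atom)
-- by two dictionaries counting the already-placed H and C atoms per coordinate.

-- ===== PORT A =====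
-- the module-level constant 'protein' (64 entries)
def pvProtein : List Char :=
  ['H', 'H', 'H', 'H', 'H', 'H', 'H', 'H', 'H', 'H', 'H', 'H', 'P', 'H', 'P', 'H', 'P', 'P',
   'H', 'H', 'P', 'P', 'H', 'H', 'P', 'P', 'H', 'P', 'P', 'H', 'H', 'P', 'P', 'H', 'H', 'P', 'P',
   'H', 'P', 'P', 'H', 'H', 'P', 'P', 'H', 'H', 'P', 'P', 'H', 'P', 'H', 'P', 'H', 'H', 'H', 'H',
   'H', 'H', 'H', 'H', 'H', 'H', 'H', 'H']

-- loop body of 'direction_to_xy' (helper of both Pythons, identical code in both files).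
-- pos_x/pos_y always have length ≥ 2, so the pyGetD defaults at indices -1/-2 are never used (exact).
def dxyBody (st : List Int × List Int) (s : Char) : List Int × List Int :=
  let pos_x := st.1
  let pos_y := st.2
  let delta_x := PySem.List.pyGetD pos_x (-1) 0 - PySem.List.pyGetD pos_x (-2) 0
  let delta_y := PySem.List.pyGetD pos_y (-1) 0 - PySem.List.pyGetD pos_y (-2) 0
  if s = 'S' then
    (pos_x ++ [PySem.List.pyGetD pos_x (-1) 0 + delta_x],
     pos_y ++ [PySem.List.pyGetD pos_y (-1) 0 + delta_y])
  else if s = 'L' then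
    (pos_x ++ [PySem.List.pyGetD pos_x (-1) 0 - delta_y],
     pos_y ++ [PySem.List.pyGetD pos_y (-1) 0 + delta_x])
  else if s = 'R' then
    (pos_x ++ [PySem.List.pyGetD pos_x (-1) 0 + delta_y],
     pos_y ++ [PySem.List.pyGetD pos_y (-1) 0 - delta_x])
  else (pos_x, pos_y)

def directionToXy (string : String) : List Int × List Int :=
  string.toList.foldl dxyBody ([0, 1], [0, 0])

def pvDirs : List (Int × Int) := [(-1, 0), (0, 1), (1, 0), (0, -1)]

-- A's two score-update if-blocks for one interacting pair
def aInteract (pi pj : Char) (score : Int) : Int :=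
  let score := if pi = 'H' then (if pj = 'H' ∨ pj = 'C' then score + (-1) else score) else score
  let score := if pi = 'C' then
      (let score := if pj = 'C' then score + (-5) else score
       if pj = 'H' then score + (-1) else score)
    else score
  score

-- body of A's outer loop 'for i in range(length)'; state = (coordinates, score).
-- pyGetD pvProtein i ' ' is exact under Pre_ (there i < 64); the lx/ly lookups are in range.
def aStep (lx ly : List Int) (st : List (Int × Int) × Int) (i : Int) : List (Int × Int) × Int :=
  let coordinates := st.1
  let score := st.2
  let xi := PySem.List.pyGetD lx i 0
  let yi := PySem.List.pyGetD ly i 0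
  let pi := PySem.List.pyGetD pvProtein i ' '
  let score :=
    if ¬ (pi = 'P') then
      pvDirs.foldl (fun score d =>
        (PySem.List.pyRange 0 (coordinates.length : Int) 1).foldl (fun score j =>
          if ((xi + d.1, yi + d.2) = PySem.List.pyGetD coordinates j (0, 0) ∧
              ¬ (xi + d.1 = PySem.List.pyGetD lx (i - 1) 0 ∧
                 yi + d.2 = PySem.List.pyGetD ly (i - 1) 0)) then
            aInteract pi (PySem.List.pyGetD pvProtein j ' ') score
          else score) score) score
    else score
  (coordinates ++ [(xi, yi)], score)

def score_func (string : String) : Int :=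
  let p := directionToXy string
  ((PySem.List.pyRange 0 (p.1.length : Int) 1).foldl (aStep p.1 p.2) ([], 0)).2

-- ===== PORT B =====
-- body of B's loop 'for i in range(len(list_x))'; state = (hcnt, ccnt, prev, score).
def bStep (lx ly : List Int)
    (st : PySem.Dict (Int × Int) Int × PySem.Dict (Int × Int) Int × Option (Int × Int) × Int)
    (i : Int) :
    PySem.Dict (Int × Int) Int × PySem.Dict (Int × Int) Int × Option (Int × Int) × Int :=
  let hcnt := st.1
  let ccnt := st.2.1
  let prev := st.2.2.1
  let score := st.2.2.2
  let p : Int × Int := (PySem.List.pyGetD lx i 0, PySem.List.pyGetD ly i 0)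
  let kind := PySem.List.pyGetD pvProtein i ' '
  if kind = 'H' ∨ kind = 'C' then
    let score :=
      [(p.1 - 1, p.2), (p.1, p.2 + 1), (p.1 + 1, p.2), (p.1, p.2 - 1)].foldl
        (fun score nb =>
          if some nb = prev then score
          else
            let h := hcnt.getD nb 0
            let c := ccnt.getD nb 0
            if kind = 'H' then score - (h + c) else score - (h + 5 * c))
        score
    if kind = 'H' then (hcnt.insert p (hcnt.getD p 0 + 1), ccnt, some p, score)
    else (hcnt, ccnt.insert p (ccnt.getD p 0 + 1), some p, score)
  else (hcnt, ccnt, some p, score)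

def score_func_alt (string : String) : Int :=
  let p := directionToXy string
  ((PySem.List.pyRange 0 (p.1.length : Int) 1).foldl (bStep p.1 p.2)
    (PySem.Dict.empty, PySem.Dict.empty, none, 0)).2.2.2

-- ===== PRECONDITION & SPEC =====
-- Pre_ excludes exactly the strings with more than 62 movement characters ('S'/'L'/'R'):
-- there the walk has more than 64 positions and A's lookup in the 64-entry protein table
-- raises IndexError (B's Python raises the same way there).
def Pre_score_func (string : String) : Prop :=
  string.toList.countP (fun c => decide (c = 'S' ∨ c = 'L' ∨ c = 'R')) ≤ 62
instance (string : String) : Decidable (Pre_score_func string) := by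
  unfold Pre_score_func; infer_instance

def pvWitness_score_func : String := "SLRS"

def Spec_score_func (string : String) (out : Int) : Prop := out = score_func_alt string
instance (string : String) (out : Int) : Decidable (Spec_score_func string out) := by
  unfold Spec_score_func; infer_instance

-- ===== CLAIM (what is proved, stated in full; the proofs are below) =====
def Claim_equal_score_func : Prop :=
  ∀ (string : String), Dom_score_func string → Pre_score_func string →
    Spec_score_func string (score_func string)

-- ===== LEMMAS AND PROOFS =====

-- the coordinate of atom j
def pvPosAt (lx ly : List Int) (j : Nat) : Int × Int := (lx.getD j 0, ly.getD j 0)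

-- number of atoms of kind ch among the first k atoms sitting at coordinate t
def pvCnt (lx ly : List Int) (ch : Char) (k : Nat) (t : Int × Int) : Nat :=
  (List.range k).countP (fun j => pvPosAt lx ly j = t ∧ pvProtein.getD j ' ' = ch)

-- interaction weight computed by A's nested ifs
def pvW (pi pj : Char) : Int :=
  (if pi = 'H' then (if pj = 'H' ∨ pj = 'C' then -1 else 0) else 0) +
  (if pi = 'C' then ((if pj = 'C' then -5 else 0) + (if pj = 'H' then -1 else 0)) else 0)

theorem pvW_other (pi pj : Char) (h1 : pj ≠ 'H') (h2 : pj ≠ 'C') : pvW pi pj = 0 := by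
  simp [pvW, h1, h2]

theorem aInteract_eq_w (pi pj : Char) (s : Int) : aInteract pi pj s = s + pvW pi pj := by
  simp only [aInteract, pvW]
  split_ifs <;> simp_all

theorem dxy_aux (cs : List Char) : ∀ (px py : List Int),
    (cs.foldl dxyBody (px, py)).1.length =
      px.length + cs.countP (fun c => decide (c = 'S' ∨ c = 'L' ∨ c = 'R')) ∧
    (cs.foldl dxyBody (px, py)).2.length =
      py.length + cs.countP (fun c => decide (c = 'S' ∨ c = 'L' ∨ c = 'R')) := by
  induction cs with
  | nil => simp
  | cons c cs ih =>
    intro px py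
    simp only [List.foldl_cons, List.countP_cons]
    by_cases hS : c = 'S' <;> by_cases hL : c = 'L' <;> by_cases hR : c = 'R' <;>
      simp [dxyBody, hS, hL, hR, ih] <;> omega

theorem dxy_len (s : String) :
    (directionToXy s).1.length = 2 + s.toList.countP (fun c => decide (c = 'S' ∨ c = 'L' ∨ c = 'R')) ∧
    (directionToXy s).2.length = (directionToXy s).1.length := by
  unfold directionToXy
  have h := dxy_aux s.toList [0, 1] [0, 0]
  constructor
  · rw [h.1]; rfl
  · rw [h.1, h.2]; rfl

theorem cnt_succ (lx ly : List Int) (ch : Char) (k : Nat) (t : Int × Int) :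
    (pvCnt lx ly ch (k + 1) t : Int) =
      (pvCnt lx ly ch k t : Int) +
        (if (pvPosAt lx ly k = t ∧ pvProtein.getD k ' ' = ch) then 1 else 0) := by
  unfold pvCnt
  rw [List.range_succ, List.countP_append]
  by_cases h : pvPosAt lx ly k = t ∧ pvProtein.getD k ' ' = ch
  · simp only [List.countP_cons, List.countP_nil, if_pos h, decide_eq_true_eq]
    push_cast; ring
  · simp only [List.countP_cons, List.countP_nil, decide_eq_true_eq]
    rw [if_neg h, if_neg h]
    push_cast; ring

theorem sum_w (lx ly : List Int) (pi : Char) (t : Int × Int) (k : Nat) :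
    ((List.range k).map (fun j =>
        if (t = pvPosAt lx ly j) then pvW pi (pvProtein.getD j ' ') else 0)).sum =
      pvW pi 'H' * (pvCnt lx ly 'H' k t : Int) + pvW pi 'C' * (pvCnt lx ly 'C' k t : Int) := by
  induction k with
  | zero => simp [pvCnt]
  | succ k ih =>
    rw [List.range_succ]
    simp only [List.map_append, List.sum_append, List.map_cons, List.map_nil,
      List.sum_cons, List.sum_nil, ih, cnt_succ]
    generalize pvProtein.getD k ' ' = pj
    by_cases hm : t = pvPosAt lx ly k
    · have hm' : pvPosAt lx ly k = t := hm.symm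
      rw [if_pos hm]
      by_cases hH : pj = 'H'
      · subst hH
        rw [if_pos ⟨hm', rfl⟩, if_neg (by simp [hm'])]
        ring
      · by_cases hC : pj = 'C'
        · subst hC
          rw [if_neg (by simp [hH]), if_pos ⟨hm', rfl⟩]
          ring
        · rw [pvW_other pi pj hH hC, if_neg (by simp [hH]), if_neg (by simp [hC])]
          ring
    · have hm' : ¬ pvPosAt lx ly k = t := fun h => hm h.symm
      rw [if_neg hm, if_neg (by simp [hm']), if_neg (by simp [hm'])]
      ring

-- simulation invariant between A's state and B's state after k steps
def pvInv (lx ly : List Int) (k : Nat)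
    (stA : List (Int × Int) × Int)
    (stB : PySem.Dict (Int × Int) Int × PySem.Dict (Int × Int) Int × Option (Int × Int) × Int) :
    Prop :=
  stA.1 = (List.range k).map (pvPosAt lx ly) ∧
  stB.2.2.2 = stA.2 ∧
  stB.2.2.1 = (if k = 0 then none else some (pvPosAt lx ly (k - 1))) ∧
  (∀ t, stB.1.getD t 0 = (pvCnt lx ly 'H' k t : Int)) ∧
  (∀ t, stB.2.1.getD t 0 = (pvCnt lx ly 'C' k t : Int))

-- one direction: A's scan over the placed atoms equals B's two dictionary lookups
theorem dir_step (lx ly : List Int) (k : Nat)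
    (hd cd : PySem.Dict (Int × Int) Int) (prev : Option (Int × Int))
    (hprev : prev = (if k = 0 then none else some (pvPosAt lx ly (k - 1))))
    (hH : ∀ t, hd.getD t 0 = (pvCnt lx ly 'H' k t : Int))
    (hC : ∀ t, cd.getD t 0 = (pvCnt lx ly 'C' k t : Int))
    (pi : Char) (hpi : pi = 'H' ∨ pi = 'C') (t1 t2 s : Int) :
    ((PySem.List.pyRange 0 ((((List.range k).map (pvPosAt lx ly)).length : Nat) : Int) 1).foldl
        (fun score j =>
          if ((t1, t2) = PySem.List.pyGetD ((List.range k).map (pvPosAt lx ly)) j (0, 0) ∧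
              ¬ (t1 = PySem.List.pyGetD lx ((k : Int) - 1) 0 ∧
                 t2 = PySem.List.pyGetD ly ((k : Int) - 1) 0)) then
            aInteract pi (PySem.List.pyGetD pvProtein j ' ') score
          else score) s) =
      (if some (t1, t2) = prev then s
       else if pi = 'H' then s - (hd.getD (t1, t2) 0 + cd.getD (t1, t2) 0)
       else s - (hd.getD (t1, t2) 0 + 5 * cd.getD (t1, t2) 0)) := by
  have hbody : (fun (score : Int) (j : Int) =>
        if ((t1, t2) = PySem.List.pyGetD ((List.range k).map (pvPosAt lx ly)) j (0, 0) ∧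
            ¬ (t1 = PySem.List.pyGetD lx ((k : Int) - 1) 0 ∧
               t2 = PySem.List.pyGetD ly ((k : Int) - 1) 0)) then
          aInteract pi (PySem.List.pyGetD pvProtein j ' ') score
        else score) =
      (fun (score : Int) (j : Int) => score +
        (if ((t1, t2) = PySem.List.pyGetD ((List.range k).map (pvPosAt lx ly)) j (0, 0) ∧
            ¬ (t1 = PySem.List.pyGetD lx ((k : Int) - 1) 0 ∧
               t2 = PySem.List.pyGetD ly ((k : Int) - 1) 0)) then
          pvW pi (PySem.List.pyGetD pvProtein j ' ') else 0)) := by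
    funext score j
    split_ifs with hc
    · rw [aInteract_eq_w]
    · ring
  rw [hbody, PySem.List.foldl_add, PySem.List.pyRange_one]
  rw [List.map_map]
  simp only [Function.comp_def, zero_add, List.length_map, List.length_range, Int.sub_zero,
    Int.toNat_natCast, PySem.List.pyGetD_natCast]
  rcases Nat.eq_zero_or_pos k with hk0 | hkpos
  · subst hk0
    simp only [List.range_zero, List.map_nil, List.sum_nil, add_zero]
    rw [hprev]
    have hH0 : pvCnt lx ly 'H' 0 (t1, t2) = 0 := by simp [pvCnt]
    have hC0 : pvCnt lx ly 'C' 0 (t1, t2) = 0 := by simp [pvCnt]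
    rcases hpi with h | h <;> subst h <;>
      simp [hH (t1, t2), hC (t1, t2), hH0, hC0]
  · have hk1 : ((k : Int) - 1) = ((k - 1 : Nat) : Int) := by omega
    simp only [hk1, PySem.List.pyGetD_natCast]
    have hEiff : (t1 = lx.getD (k - 1) 0 ∧ t2 = ly.getD (k - 1) 0) ↔
        (t1, t2) = pvPosAt lx ly (k - 1) := by
      simp [pvPosAt, Prod.ext_iff]
    have hprev' : prev = some (pvPosAt lx ly (k - 1)) := by
      rw [hprev, if_neg (by omega)]
    by_cases hE : (t1, t2) = pvPosAt lx ly (k - 1)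
    · have hzero : ((List.range k).map (fun n =>
          if ((t1, t2) = ((List.range k).map (pvPosAt lx ly)).getD n (0, 0) ∧
              ¬ (t1 = lx.getD (k - 1) 0 ∧ t2 = ly.getD (k - 1) 0)) then
            pvW pi (pvProtein.getD n ' ') else 0)).sum = 0 := by
        apply List.sum_eq_zero
        intro x hx
        obtain ⟨n, hn, hxe⟩ := List.mem_map.mp hx
        rw [← hxe, if_neg]
        rintro ⟨-, hne⟩
        exact hne (hEiff.mpr hE)
      rw [hzero, hprev', if_pos (by rw [hE])]
      ring
    · have hmap : ((List.range k).map (fun n =>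
          if ((t1, t2) = ((List.range k).map (pvPosAt lx ly)).getD n (0, 0) ∧
              ¬ (t1 = lx.getD (k - 1) 0 ∧ t2 = ly.getD (k - 1) 0)) then
            pvW pi (pvProtein.getD n ' ') else 0)) =
          ((List.range k).map (fun n =>
            if ((t1, t2) = pvPosAt lx ly n) then pvW pi (pvProtein.getD n ' ') else 0)) := by
        apply List.map_congr_left
        intro n hn
        rw [PySem.List.getD_map_range _ _ _ _ (List.mem_range.mp hn)]
        by_cases hm : (t1, t2) = pvPosAt lx ly n
        · rw [if_pos ⟨hm, fun hEc => hE (hEiff.mp hEc)⟩, if_pos hm]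
        · rw [if_neg (fun hcc => hm hcc.1), if_neg hm]
      rw [hmap, sum_w, hprev', if_neg (by simpa using hE),
        hH (t1, t2), hC (t1, t2)]
      rcases hpi with h | h <;> subst h
      · have w1 : pvW 'H' 'H' = -1 := by decide
        have w2 : pvW 'H' 'C' = -1 := by decide
        rw [w1, w2, if_pos rfl]
        ring
      · have w1 : pvW 'C' 'H' = -1 := by decide
        have w2 : pvW 'C' 'C' = -5 := by decide
        rw [w1, w2, if_neg (by decide)]
        ring

-- one step of the simulation
theorem step_sim (lx ly : List Int) (h64 : lx.length ≤ 64)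
    (k : Nat) (hk : k < lx.length) (stA stB)
    (hInv : pvInv lx ly k stA stB) :
    pvInv lx ly (k + 1) (aStep lx ly stA (k : Int)) (bStep lx ly stB (k : Int)) := by
  obtain ⟨ca, sa⟩ := stA
  obtain ⟨hdict, cdict, prevv, sb⟩ := stB
  obtain ⟨hc, hs, hp, hHH, hCC⟩ := hInv
  simp only at hc hs hp hHH hCC
  subst hc hs
  have hk64 : k < 64 := by omega
  have hHP : pvProtein.getD k ' ' = 'H' ∨ pvProtein.getD k ' ' = 'P' := by
    have hall : ∀ j ∈ List.range 64,
        pvProtein.getD j ' ' = 'H' ∨ pvProtein.getD j ' ' = 'P' := by decide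
    exact hall k (List.mem_range.mpr hk64)
  have hpos : (pvPosAt lx ly k) = (lx.getD k 0, ly.getD k 0) := rfl
  have haddneg : ∀ a : Int, a + -1 = a - 1 := fun a => by ring
  have hcH : ∀ t, (pvCnt lx ly 'H' (k + 1) t : Int) =
      (pvCnt lx ly 'H' k t : Int) +
        (if (pvPosAt lx ly k = t ∧ pvProtein.getD k ' ' = 'H') then 1 else 0) :=
    fun t => cnt_succ lx ly 'H' k t
  have hcC : ∀ t, (pvCnt lx ly 'C' (k + 1) t : Int) =
      (pvCnt lx ly 'C' k t : Int) +
        (if (pvPosAt lx ly k = t ∧ pvProtein.getD k ' ' = 'C') then 1 else 0) :=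
    fun t => cnt_succ lx ly 'C' k t
  rcases hHP with hkind | hkind
  · -- an H atom: both programs score it, B updates the H dictionary
    unfold aStep bStep
    simp only [PySem.List.pyGetD_natCast, hkind, pvDirs, List.foldl_cons, List.foldl_nil,
      reduceIte, haddneg, add_zero]
    simp only [dir_step lx ly k hdict cdict prevv hp hHH hCC 'H' (Or.inl rfl)]
    simp only [if_pos (show ¬('H' = 'P') by decide)]
    refine ⟨?_, rfl, ?_, ?_, ?_⟩
    · simp [List.range_succ, pvPosAt]
    · simp [pvPosAt]
    · intro t
      simp only [true_or, if_true]
      rw [PySem.Dict.getD_insert, hcH t]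
      have hkind' : pvProtein[k]?.getD ' ' = 'H' := hkind
      by_cases ht : t = (lx.getD k 0, ly.getD k 0)
      · subst ht
        rw [if_pos rfl, if_pos ⟨hpos, hkind⟩, hHH]
      · rw [if_neg ht, if_neg (fun hcon => ht (by rw [← hcon.1]; exact hpos)),
          hHH t, add_zero]
    · intro t
      simp only [true_or, if_true]
      rw [hCC t, hcC t]
      have hkind' : pvProtein[k]?.getD ' ' = 'H' := hkind
      simp [hkind']
  · -- a P atom: both programs skip it and leave score and dictionaries unchanged
    unfold aStep bStep
    simp only [PySem.List.pyGetD_natCast, hkind]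
    rw [if_neg (by simp : ¬¬True), if_neg (by decide : ¬('P' = 'H' ∨ 'P' = 'C'))]
    refine ⟨?_, rfl, ?_, ?_, ?_⟩
    · simp [List.range_succ, pvPosAt]
    · simp [pvPosAt]
    · intro t
      rw [hHH t, hcH t]
      have hkind' : pvProtein[k]?.getD ' ' = 'P' := hkind
      simp [hkind']
    · intro t
      rw [hCC t, hcC t]
      have hkind' : pvProtein[k]?.getD ' ' = 'P' := hkind
      simp [hkind']

theorem main_sim (lx ly : List Int) (h64 : lx.length ≤ 64)
    (k : Nat) (hk : k ≤ lx.length) :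
    pvInv lx ly k
      ((PySem.List.pyRange 0 (k : Int) 1).foldl (aStep lx ly) ([], 0))
      ((PySem.List.pyRange 0 (k : Int) 1).foldl (bStep lx ly)
        (PySem.Dict.empty, PySem.Dict.empty, none, 0)) := by
  induction k with
  | zero =>
    simp [pvInv, pvCnt, PySem.Dict.getD_empty]
  | succ k ih =>
    have hk' : k < lx.length := by omega
    have hpeel : PySem.List.pyRange 0 ((k : Int) + 1) 1 =
        PySem.List.pyRange 0 (k : Int) 1 ++ [(k : Int)] :=
      PySem.List.pyRange_one_succ_right (by positivity)
    have hcast : ((k + 1 : Nat) : Int) = (k : Int) + 1 := by push_cast; ring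
    rw [hcast, hpeel, List.foldl_append, List.foldl_append]
    simp only [List.foldl_cons, List.foldl_nil]
    exact step_sim lx ly h64 k hk' _ _ (ih (by omega))

-- ===== VERDICT (by name: the statement is the Claim_ definition above) =====
theorem score_func_spec : Claim_equal_score_func := by
  intro s _ hpre
  unfold Spec_score_func score_func score_func_alt
  have hlen := dxy_len s
  have h64 : (directionToXy s).1.length ≤ 64 := by
    have := hlen.1
    unfold Pre_score_func at hpre
    omega
  have := main_sim (directionToXy s).1 (directionToXy s).2 h64
    (directionToXy s).1.length (le_refl _)
  exact (this.2.1).symm
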